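-- pv_equiv track=rewrite | github.com/nmiwasaki/Advent-of-Code | 2015/Day 11/11-1.py | doubles
-- ===== SOURCE A (Python) =====
-- def doubles(password):
--     pairs = 0   # Quantity
--     i = 0
--     while i < len(password) - 1 and pairs < 2:
--         if password[i] == password[i + 1]:
--             # pair found
--             pairs += 1
--             i +=2
--         else:
--             i += 1
--     if pairs >= 2:
--         return True
--     else:
--         return False
-- ===== SOURCE B (Python) =====
-- def doubles(password):
--     n = len(password)
--     return any(password[i] == password[i + 1] and password[j] == password[j + 1]
--                for i in range(n - 1) for j in range(i + 2, n - 1))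
-- ===== Notes on version B (the rewrite author's own statement) =====
-- stated objective: alternative
-- what changed: Replaces the greedy index-walking counter (skip 2 on a match, early exit at 2) with a direct existence test: are there two equal adjacent pairs at positions i and j with j >= i+2 (correct because the greedy scan maximises the number of disjoint pairs).
import Mathlib
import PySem

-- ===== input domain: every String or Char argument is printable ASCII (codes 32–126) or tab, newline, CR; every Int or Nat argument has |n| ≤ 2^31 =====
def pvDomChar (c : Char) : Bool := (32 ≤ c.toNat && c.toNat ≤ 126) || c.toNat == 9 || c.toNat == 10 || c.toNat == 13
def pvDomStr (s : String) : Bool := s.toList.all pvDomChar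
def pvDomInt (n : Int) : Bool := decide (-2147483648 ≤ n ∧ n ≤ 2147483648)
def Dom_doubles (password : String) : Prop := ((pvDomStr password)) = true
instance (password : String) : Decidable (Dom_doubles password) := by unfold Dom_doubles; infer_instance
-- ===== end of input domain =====

-- B replaces A's greedy skip-by-2 counter with a brute-force existence test for two
-- disjoint adjacent equal pairs (alternative decomposition; not faster).

-- ===== PORT A =====
-- the while loop of A: state (i, pairs); indices are in range whenever read (loop guard), so getD is exact
def doublesLoop (cs : List Char) (i pairs : Nat) : Nat :=
  if h : i + 1 < cs.length ∧ pairs < 2 then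
    if cs.getD i ' ' == cs.getD (i + 1) ' ' then
      doublesLoop cs (i + 2) (pairs + 1)
    else
      doublesLoop cs (i + 1) pairs
  else pairs
termination_by cs.length - i
decreasing_by all_goals omega

def doubles (password : String) : Bool :=
  let pairs := doublesLoop password.toList 0 0
  if pairs ≥ 2 then true else false

-- ===== PORT B =====
-- Source B: any(... for i in range(n-1) for j in range(i+2, n-1)); indices are in range when read
def doubles_alt (password : String) : Bool :=
  let cs := password.toList
  let n := cs.length
  (List.range (n - 1)).any fun i =>
    (List.range' (i + 2) (n - 1 - (i + 2))).any fun j =>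
      (cs.getD i ' ' == cs.getD (i + 1) ' ') && (cs.getD j ' ' == cs.getD (j + 1) ' ')

-- ===== PRECONDITION & SPEC =====
def Spec_doubles (password : String) (out : Bool) : Prop := out = doubles_alt password
instance (password : String) (out : Bool) : Decidable (Spec_doubles password out) := by unfold Spec_doubles; infer_instance

-- ===== CLAIM (what is proved, stated in full; the proofs are below) =====
def Claim_equal_doubles : Prop := ∀ (password : String), Dom_doubles password → Spec_doubles password (doubles password)

-- ===== LEMMAS AND PROOFS =====

-- uncapped greedy pair count (characterises A's loop)
def gcount : List Char → Nat
  | a :: b :: t => if a == b then 1 + gcount t else gcount (b :: t)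
  | _ => 0

-- "there is an equal adjacent pair at position i"
def pairAt (cs : List Char) (i : Nat) : Prop :=
  i + 1 < cs.length ∧ cs.getD i ' ' = cs.getD (i + 1) ' '

lemma gcount_cons_cons (a b : Char) (t : List Char) :
    gcount (a :: b :: t) = if a == b then 1 + gcount t else gcount (b :: t) := rfl

lemma gcount_short (cs : List Char) (h : cs.length ≤ 1) : gcount cs = 0 := by
  match cs, h with
  | [], _ => rfl
  | [a], _ => rfl

lemma doublesLoop_eq (cs : List Char) (i pairs : Nat) (hp : pairs ≤ 2) :
    doublesLoop cs i pairs = min (pairs + gcount (cs.drop i)) 2 := by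
  revert hp
  induction i, pairs using doublesLoop.induct cs with
  | case1 i pairs h heq ih =>
    intro hp
    obtain ⟨hi, hp2⟩ := h
    rw [doublesLoop]
    rw [dif_pos ⟨hi, hp2⟩, if_pos heq]
    rw [ih (by omega)]
    have h1 : i < cs.length := by omega
    rw [List.drop_eq_getElem_cons h1, List.drop_eq_getElem_cons hi]
    have e1 : cs.getD i ' ' = cs[i] := List.getD_eq_getElem _ _ h1
    have e2 : cs.getD (i + 1) ' ' = cs[i + 1] := List.getD_eq_getElem _ _ hi
    have hb : (cs[i] == cs[i + 1]) = true := by rw [← e1, ← e2]; exact heq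
    rw [gcount_cons_cons, if_pos hb]
    have h3 : List.drop (i + 1 + 1) cs = List.drop (i + 2) cs := rfl
    rw [h3]
    omega
  | case2 i pairs h hne ih =>
    intro hp
    obtain ⟨hi, hp2⟩ := h
    rw [doublesLoop]
    rw [dif_pos ⟨hi, hp2⟩, if_neg hne]
    rw [ih hp]
    have h1 : i < cs.length := by omega
    have hdrop : cs.drop (i + 1) = cs[i + 1] :: cs.drop (i + 2) := List.drop_eq_getElem_cons hi
    rw [List.drop_eq_getElem_cons h1, hdrop]
    have e1 : cs.getD i ' ' = cs[i] := List.getD_eq_getElem _ _ h1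
    have e2 : cs.getD (i + 1) ' ' = cs[i + 1] := List.getD_eq_getElem _ _ hi
    have hb : ¬ (cs[i] == cs[i + 1]) = true := by rw [← e1, ← e2]; exact hne
    rw [gcount_cons_cons, if_neg hb, ← hdrop]
  | case3 i pairs h =>
    intro hp
    rw [doublesLoop, dif_neg h]
    rcases Nat.lt_or_ge pairs 2 with h2 | h2
    · have hi : ¬ i + 1 < cs.length := by tauto
      have hlen : (cs.drop i).length ≤ 1 := by simp only [List.length_drop]; omega
      rw [gcount_short _ hlen]; omega
    · omega

lemma pairAt_cons_succ (a : Char) (t : List Char) (i : Nat) :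
    pairAt (a :: t) (i + 1) ↔ pairAt t i := by
  unfold pairAt
  simp

lemma pairAt_cons_cons (a b : Char) (t : List Char) (i : Nat) :
    pairAt (a :: b :: t) (i + 2) ↔ pairAt t i := by
  rw [show i + 2 = (i + 1) + 1 by rfl, pairAt_cons_succ, pairAt_cons_succ]

lemma pairAt_zero (a b : Char) (t : List Char) : pairAt (a :: b :: t) 0 ↔ a = b := by
  unfold pairAt
  simp [List.getD]

lemma no_cons_cons_short (t : List Char)
    (h : ∀ (a b : Char) (r : List Char), t = a :: b :: r → False) : t.length ≤ 1 := by
  cases t with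
  | nil => simp
  | cons a t' =>
    cases t' with
    | nil => simp
    | cons b r => exact absurd rfl (h a b r)

lemma gcount_one_iff (cs : List Char) : 1 ≤ gcount cs ↔ ∃ i, pairAt cs i := by
  induction cs using gcount.induct with
  | case1 a b t heq ih =>
    rw [gcount_cons_cons, if_pos heq]
    constructor
    · intro _; exact ⟨0, (pairAt_zero a b t).mpr (by simpa using heq)⟩
    · intro _; omega
  | case2 a b t hne ih =>
    have hab : a ≠ b := by simpa using hne
    rw [gcount_cons_cons, if_neg hne, ih]
    constructor
    · rintro ⟨i, hi⟩; exact ⟨i + 1, (pairAt_cons_succ a (b :: t) i).mpr hi⟩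
    · rintro ⟨i, hi⟩
      match i with
      | 0 => exact absurd ((pairAt_zero a b t).mp hi) hab
      | i + 1 => exact ⟨i, (pairAt_cons_succ a (b :: t) i).mp hi⟩
  | case3 t h =>
    have hlen := no_cons_cons_short t h
    rw [gcount_short _ hlen]
    constructor
    · omega
    · rintro ⟨i, hi, _⟩; omega

lemma gcount_two_iff (cs : List Char) :
    2 ≤ gcount cs ↔ ∃ i j, pairAt cs i ∧ pairAt cs j ∧ i + 2 ≤ j := by
  induction cs using gcount.induct with
  | case1 a b t heq ih =>
    have hab : a = b := by simpa using heq
    rw [gcount_cons_cons, if_pos heq]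
    have h1 : 2 ≤ 1 + gcount t ↔ 1 ≤ gcount t := by omega
    rw [h1, gcount_one_iff]
    constructor
    · rintro ⟨k, hk⟩
      exact ⟨0, k + 2, (pairAt_zero a b t).mpr hab, (pairAt_cons_cons a b t k).mpr hk, by omega⟩
    · rintro ⟨i, j, _, hj, hij⟩
      match j, hij with
      | j + 2, _ => exact ⟨j, (pairAt_cons_cons a b t j).mp hj⟩
  | case2 a b t hne ih =>
    have hab : a ≠ b := by simpa using hne
    rw [gcount_cons_cons, if_neg hne, ih]
    constructor
    · rintro ⟨i, j, hi, hj, hij⟩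
      exact ⟨i + 1, j + 1, (pairAt_cons_succ a (b :: t) i).mpr hi,
        (pairAt_cons_succ a (b :: t) j).mpr hj, by omega⟩
    · rintro ⟨i, j, hi, hj, hij⟩
      match i with
      | 0 => exact absurd ((pairAt_zero a b t).mp hi) hab
      | i + 1 =>
        match j, hij with
        | j + 1, _ =>
          exact ⟨i, j, (pairAt_cons_succ a (b :: t) i).mp hi,
            (pairAt_cons_succ a (b :: t) j).mp hj, by omega⟩
  | case3 t h =>
    have hlen := no_cons_cons_short t h
    rw [gcount_short _ hlen]
    constructor
    · omega
    · rintro ⟨i, j, hi, _⟩; exact absurd hi.1 (by omega)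

lemma doubles_alt_iff (password : String) :
    doubles_alt password = true ↔
      ∃ i j, pairAt password.toList i ∧ pairAt password.toList j ∧ i + 2 ≤ j := by
  unfold doubles_alt pairAt
  simp only [List.any_eq_true, List.mem_range, List.mem_range'_1, Bool.and_eq_true, beq_iff_eq]
  constructor
  · rintro ⟨i, hi, j, hj, he1, he2⟩
    exact ⟨i, j, ⟨by omega, he1⟩, ⟨by omega, he2⟩, by omega⟩
  · rintro ⟨i, j, ⟨hi, he1⟩, ⟨hj, he2⟩, hij⟩
    exact ⟨i, by omega, j, ⟨by omega, by omega⟩, he1, he2⟩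

-- ===== VERDICT (by name: the statement is the Claim_ definition above) =====
theorem doubles_spec : Claim_equal_doubles := by
  intro password _
  unfold Spec_doubles doubles
  have hA : doublesLoop password.toList 0 0 = min (gcount password.toList) 2 := by
    simpa using doublesLoop_eq password.toList 0 0 (by omega)
  rw [Bool.eq_iff_iff]
  simp only [hA, ge_iff_le]
  rw [doubles_alt_iff, ← gcount_two_iff]
  constructor
  · intro h
    split at h
    · omega
    · simp at h
  · intro h
    rw [if_pos (by omega)]
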